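-- pv_equiv track=rewrite | github.com/scjohnson/aoc_2019 | 01/solution.py | tot_fuel_needed
-- ===== SOURCE A (Python) =====
-- def tot_fuel_needed(mass):
--     total_fuel = 0
--     new_mass = mass
--     while True:
--         new_mass = (new_mass//3)-2
--         total_fuel += new_mass
--         if new_mass < 9:
--             return total_fuel
-- ===== SOURCE B (Python) =====
-- def tot_fuel_needed(mass):
--     f = mass // 3 - 2
--     if f < 9:
--         return f
--     return f + tot_fuel_needed(f)
-- ===== Notes on version B (the rewrite author's own statement) =====
-- stated objective: alternative
-- what changed: Replaces the accumulator while-loop with direct recursion on the fuel value: compute the next fuel term and, while it is at or above the loop's cutoff, add the recursively computed fuel for it.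
import Mathlib
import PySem

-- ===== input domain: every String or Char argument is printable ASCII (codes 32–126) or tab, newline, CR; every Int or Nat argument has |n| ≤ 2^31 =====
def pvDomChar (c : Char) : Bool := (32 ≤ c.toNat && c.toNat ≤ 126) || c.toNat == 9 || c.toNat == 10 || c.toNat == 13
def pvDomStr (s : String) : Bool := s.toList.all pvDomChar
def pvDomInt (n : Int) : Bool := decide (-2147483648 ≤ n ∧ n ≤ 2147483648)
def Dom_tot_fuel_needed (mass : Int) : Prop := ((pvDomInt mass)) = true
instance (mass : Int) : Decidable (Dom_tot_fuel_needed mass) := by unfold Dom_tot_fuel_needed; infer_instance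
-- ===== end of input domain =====

-- B replaces A's accumulator while-loop by direct recursion on the fuel value (same cost, different decomposition).

-- termination helper for both ports: when the next term is ≥ 9 it is smaller than the current mass
theorem pv_fuel_lt (m : Int) (h : ¬ PySem.Int.floordiv m 3 - 2 < 9) :
    (PySem.Int.floordiv m 3 - 2).toNat < m.toNat := by
  rw [PySem.Int.floordiv_eq_ediv_of_pos (by norm_num)] at *
  omega

-- ===== PORT A =====
-- A's while-loop: state (new_mass, total_fuel); each pass sets new_mass = new_mass//3 - 2,
-- adds it to total_fuel, returns total_fuel once new_mass < 9.
def pvLoopA (new_mass total_fuel : Int) : Int :=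
  let nm := PySem.Int.floordiv new_mass 3 - 2
  let tf := total_fuel + nm
  if h : nm < 9 then tf else pvLoopA nm tf
termination_by new_mass.toNat
decreasing_by exact pv_fuel_lt new_mass h

def tot_fuel_needed (mass : Int) : Int := pvLoopA mass 0

-- ===== PORT B =====
def tot_fuel_needed_alt (mass : Int) : Int :=
  let f := PySem.Int.floordiv mass 3 - 2
  if h : f < 9 then f else f + tot_fuel_needed_alt f
termination_by mass.toNat
decreasing_by exact pv_fuel_lt mass h

-- ===== PRECONDITION & SPEC =====
def Spec_tot_fuel_needed (mass : Int) (out : Int) : Prop := out = tot_fuel_needed_alt mass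
instance (mass : Int) (out : Int) : Decidable (Spec_tot_fuel_needed mass out) := by unfold Spec_tot_fuel_needed; infer_instance

-- ===== CLAIM (what is proved, stated in full; the proofs are below) =====
def Claim_equal_tot_fuel_needed : Prop := ∀ (mass : Int), Dom_tot_fuel_needed mass → Spec_tot_fuel_needed mass (tot_fuel_needed mass)

-- ===== LEMMAS AND PROOFS =====
theorem pvLoopA_eq (m t : Int) : pvLoopA m t = t + tot_fuel_needed_alt m := by
  rw [pvLoopA, tot_fuel_needed_alt]
  by_cases h : PySem.Int.floordiv m 3 - 2 < 9
  · rw [dif_pos h, dif_pos h]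
  · rw [dif_neg h, dif_neg h, pvLoopA_eq]
    ring
termination_by m.toNat
decreasing_by exact pv_fuel_lt m h

-- ===== VERDICT (by name: the statement is the Claim_ definition above) =====
theorem tot_fuel_needed_spec : Claim_equal_tot_fuel_needed := by
  intro mass _
  unfold Spec_tot_fuel_needed tot_fuel_needed
  rw [pvLoopA_eq]
  ring
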